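-- pv_equiv track=rewrite | github.com/manhquyenkma/NLACP-AttributeExtractor | nlacp/mining/namespace_hierarchy.py | _transitive_reduction
-- ===== SOURCE A (Python) =====
-- def _transitive_reduction(hierarchy, element_attrs):
--     """
--     Loại bỏ quan hệ parent redundant:
--     Nếu A→B và A→C và B→C → xóa A→C (đã có A→B→C)
--     """
--     elements = list(hierarchy.keys())
--
--     for elem in elements:
--         parents = list(hierarchy[elem]["parents"])
--         to_remove = set()
--
--         for p1 in parents:
--             for p2 in parents:
--                 if p1 == p2:
--                     continue
--                 # Nếu p2 là ancestor của p1 → p2 là redundant parent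
--                 p1_attrs = set(element_attrs.get(p1, {}).get("attrs", []))
--                 p2_attrs = set(element_attrs.get(p2, {}).get("attrs", []))
--                 if p2_attrs < p1_attrs:  # p2 ⊂ p1 → p2 is more general
--                     to_remove.add(p2)
--
--         # Remove redundant parents
--         for rp in to_remove:
--             if rp in hierarchy[elem]["parents"]:
--                 hierarchy[elem]["parents"].remove(rp)
--             # Dọn dẹp cả children list của parent bị xóa
--             if elem in hierarchy[rp]["children"]:
--                 hierarchy[rp]["children"].remove(elem)
--
--     return hierarchy
-- ===== SOURCE B (Python) =====
-- def _transitive_reduction(hierarchy, element_attrs):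
--     """Same reduction via sort-by-size + maximal-chain pass instead of the all-pairs subset scan."""
--     for elem in list(hierarchy.keys()):
--         parents = list(hierarchy[elem]["parents"])
--         attrs = {p: set(element_attrs.get(p, {}).get("attrs", [])) for p in parents}
--         order = sorted(attrs, key=lambda p: len(attrs[p]), reverse=True)
--         retained = []
--         to_remove = []
--         for p in order:
--             s = attrs[p]
--             if any(s < r for r in retained):
--                 to_remove.append(p)
--             else:
--                 retained.append(s)
--         for rp in to_remove:
--             if rp in hierarchy[elem]["parents"]:
--                 hierarchy[elem]["parents"].remove(rp)
--             if elem in hierarchy[rp]["children"]: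
--                 hierarchy[rp]["children"].remove(elem)
--     return hierarchy
-- ===== Notes on version B (the rewrite author's own statement) =====
-- stated objective: alternative
-- what changed: Per element, B builds each parent's attr-set once into a dict, sorts parents by attr-set size descending and does a single pass keeping only maximal sets (a parent is removed iff its set is a proper subset of an already-retained one), instead of A's symmetric all-pairs p1/p2 subset scan that rebuilds both sets inside the double loop; the removal/cleanup loop is unchanged.
import Mathlib
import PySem

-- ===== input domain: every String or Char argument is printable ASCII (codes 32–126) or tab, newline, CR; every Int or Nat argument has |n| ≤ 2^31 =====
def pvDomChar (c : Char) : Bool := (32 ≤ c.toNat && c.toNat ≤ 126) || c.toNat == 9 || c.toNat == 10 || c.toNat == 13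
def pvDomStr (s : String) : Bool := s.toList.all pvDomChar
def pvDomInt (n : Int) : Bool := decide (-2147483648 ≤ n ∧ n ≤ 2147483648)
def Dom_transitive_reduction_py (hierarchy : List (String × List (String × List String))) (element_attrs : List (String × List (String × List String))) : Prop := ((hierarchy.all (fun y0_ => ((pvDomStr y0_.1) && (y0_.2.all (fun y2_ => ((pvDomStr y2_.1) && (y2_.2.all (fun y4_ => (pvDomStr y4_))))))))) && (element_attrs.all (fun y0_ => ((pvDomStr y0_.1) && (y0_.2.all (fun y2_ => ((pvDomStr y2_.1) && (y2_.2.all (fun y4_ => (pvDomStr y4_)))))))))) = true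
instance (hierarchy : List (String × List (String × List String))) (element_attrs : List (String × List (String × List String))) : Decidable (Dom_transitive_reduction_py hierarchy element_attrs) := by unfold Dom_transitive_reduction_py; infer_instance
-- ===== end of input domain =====

-- B replaces A's all-pairs p1/p2 subset scan with a per-element attrs dict built once, a size-descending
-- sort and a single maximal-chain pass; return value only — the Python mutates `hierarchy` in place
-- (B performs the same mutations).

-- ===== PORT A =====
-- shared transliteration helpers: first-match lookup / in-place modification of one dict entry
-- (our model of `d[k]` reads and `d[k].remove(...)` mutations on the association list)
def pvLook? {α : Type} (l : List (String × α)) (k : String) : Option α :=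
  match l with
  | [] => none
  | (k', v) :: t => if k' = k then some v else pvLook? t k

def pvMod {α : Type} (l : List (String × α)) (k : String) (f : α → α) : List (String × α) :=
  match l with
  | [] => []
  | (k', v) :: t => if k' = k then (k', f v) :: t else (k', v) :: pvMod t k f

-- set(element_attrs.get(p, {}).get("attrs", []))
def pvAttrs (element_attrs : List (String × List (String × List String))) (p : String) : PySem.Set String :=
  PySem.Set.ofList ((pvLook? ((pvLook? element_attrs p).getD []) "attrs").getD [])

-- Python's proper-subset test s < t on sets
def pvPsub (s t : PySem.Set String) : Bool :=
  PySem.Set.issubset s t && !PySem.Set.issubset t s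

def pvParentsOf (h : List (String × List (String × List String))) (elem : String) : List String :=
  (pvLook? ((pvLook? h elem).getD []) "parents").getD []

def pvChildrenOf (h : List (String × List (String × List String))) (k : String) : List String :=
  (pvLook? ((pvLook? h k).getD []) "children").getD []

-- the removal-loop body; these Python lines are identical in A and in B
def pvRemoveStep (elem : String) (h : List (String × List (String × List String))) (rp : String) :
    List (String × List (String × List String)) :=
  let h1 := if rp ∈ pvParentsOf h elem then
      pvMod h elem (fun d => pvMod d "parents" (fun l => l.erase rp)) else h
  if elem ∈ pvChildrenOf h1 rp then
    pvMod h1 rp (fun d => pvMod d "children" (fun l => l.erase elem)) else h1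

-- body of A's outer loop over elements
def pvAStep (element_attrs : List (String × List (String × List String)))
    (h : List (String × List (String × List String))) (elem : String) :
    List (String × List (String × List String)) :=
  let parents := pvParentsOf h elem
  let to_remove : PySem.Set String :=
    parents.foldl (fun tr p1 =>
      parents.foldl (fun tr p2 =>
        if p1 = p2 then tr
        else
          let p1_attrs := pvAttrs element_attrs p1
          let p2_attrs := pvAttrs element_attrs p2
          if pvPsub p2_attrs p1_attrs then PySem.Set.add tr p2 else tr) tr) PySem.Set.empty
  to_remove.foldl (pvRemoveStep elem) h

def transitive_reduction_py (hierarchy : List (String × List (String × List String))) (element_attrs : List (String × List (String × List String))) : List (String × List (String × List String)) :=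
  let elements := hierarchy.map Prod.fst
  elements.foldl (pvAStep element_attrs) hierarchy

-- ===== PORT B =====
-- body of B's outer loop: attrs dict built once, sort by set size descending, one pass keeping maximal sets
def pvBStep (element_attrs : List (String × List (String × List String)))
    (h : List (String × List (String × List String))) (elem : String) :
    List (String × List (String × List String)) :=
  let parents := pvParentsOf h elem
  let attrs : PySem.Dict String (PySem.Set String) :=
    parents.foldl (fun d p => d.insert p (pvAttrs element_attrs p)) PySem.Dict.empty
  let order := PySem.List.sorted attrs.keys (fun p => ((attrs.getD p []).length : Int)) true
  let pass := order.foldl (fun (acc : List (PySem.Set String) × List String) p =>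
      let s := attrs.getD p []
      if acc.1.any (fun r => pvPsub s r) then (acc.1, acc.2 ++ [p]) else (acc.1 ++ [s], acc.2))
    ([], [])
  pass.2.foldl (pvRemoveStep elem) h

def transitive_reduction_py_alt (hierarchy : List (String × List (String × List String))) (element_attrs : List (String × List (String × List String))) : List (String × List (String × List String)) :=
  (hierarchy.map Prod.fst).foldl (pvBStep element_attrs) hierarchy

-- ===== PRECONDITION & SPEC =====
-- Pre_ = exactly the inputs where the Python A returns: every element's dict has a "parents" key
-- (read for every elem), and every parent that the subset test marks redundant has a hierarchy
-- entry with a "children" key (A indexes hierarchy[rp]["children"]); otherwise A raises KeyError.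
def Pre_transitive_reduction_py (hierarchy : List (String × List (String × List String))) (element_attrs : List (String × List (String × List String))) : Prop :=
  ∀ e ∈ hierarchy, ("parents" ∈ e.2.map Prod.fst) ∧
    ∀ p2 ∈ ((List.lookup "parents" e.2).getD []),
      (∃ p1 ∈ ((List.lookup "parents" e.2).getD []),
        pvPsub
          (PySem.Set.ofList ((List.lookup "attrs" ((List.lookup p2 element_attrs).getD [])).getD []))
          (PySem.Set.ofList ((List.lookup "attrs" ((List.lookup p1 element_attrs).getD [])).getD []))
          = true) →
      ∃ e' ∈ hierarchy, e'.1 = p2 ∧ "children" ∈ e'.2.map Prod.fst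

instance (hierarchy : List (String × List (String × List String))) (element_attrs : List (String × List (String × List String))) : Decidable (Pre_transitive_reduction_py hierarchy element_attrs) := by unfold Pre_transitive_reduction_py; infer_instance

def pvWitness_transitive_reduction_py : (List (String × List (String × List String))) × (List (String × List (String × List String))) :=
  ([("a", [("parents", ["b", "c"]), ("children", [])]),
    ("b", [("parents", []), ("children", ["a"])]),
    ("c", [("parents", []), ("children", ["a"])])],
   [("b", [("attrs", ["x", "y"])]), ("c", [("attrs", ["x"])])])

def Spec_transitive_reduction_py (hierarchy : List (String × List (String × List String))) (element_attrs : List (String × List (String × List String))) (out : List (String × List (String × List String))) : Prop := out = transitive_reduction_py_alt hierarchy element_attrs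
instance (hierarchy : List (String × List (String × List String))) (element_attrs : List (String × List (String × List String))) (out : List (String × List (String × List String))) : Decidable (Spec_transitive_reduction_py hierarchy element_attrs out) := by unfold Spec_transitive_reduction_py; infer_instance

-- ===== CLAIM (what is proved, stated in full; the proofs are below) =====
def Claim_equal_transitive_reduction_py : Prop := ∀ (hierarchy : List (String × List (String × List String))) (element_attrs : List (String × List (String × List String))), Dom_transitive_reduction_py hierarchy element_attrs → Pre_transitive_reduction_py hierarchy element_attrs → Spec_transitive_reduction_py hierarchy element_attrs (transitive_reduction_py hierarchy element_attrs)

-- ===== LEMMAS AND PROOFS =====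

theorem pvMod_eq_self {α : Type} (l : List (String × α)) (k : String) (f : α → α)
    (hf : ∀ v, pvLook? l k = some v → f v = v) : pvMod l k f = l := by
  induction l with
  | nil => simp [pvMod]
  | cons e t ih =>
    obtain ⟨k0, v⟩ := e
    by_cases h0 : k0 = k
    · have := hf v (by simp [pvLook?, h0])
      simp [pvMod, h0, this]
    · simp only [pvMod, if_neg h0]
      rw [ih (fun w hw => hf w (by simp [pvLook?, h0, hw]))]

theorem pvMod_congr {α : Type} (l : List (String × α)) (k : String) (f g : α → α)
    (hfg : ∀ v, f v = g v) : pvMod l k f = pvMod l k g := by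
  induction l with
  | nil => rfl
  | cons e t ih =>
    obtain ⟨k0, v⟩ := e
    by_cases h0 : k0 = k <;> simp [pvMod, h0, hfg, ih]

theorem pvMod_pvMod_self {α : Type} (l : List (String × α)) (k : String) (f g : α → α) :
    pvMod (pvMod l k f) k g = pvMod l k (fun v => g (f v)) := by
  induction l with
  | nil => rfl
  | cons e t ih =>
    obtain ⟨k0, v⟩ := e
    by_cases h0 : k0 = k <;> simp [pvMod, h0, ih]

theorem pvMod_comm {α : Type} (l : List (String × α)) (k1 k2 : String) (f g : α → α)
    (hk : k1 ≠ k2) : pvMod (pvMod l k1 f) k2 g = pvMod (pvMod l k2 g) k1 f := by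
  induction l with
  | nil => rfl
  | cons e t ih =>
    obtain ⟨k0, v⟩ := e
    by_cases h1 : k0 = k1 <;> by_cases h2 : k0 = k2 <;>
      simp_all [pvMod]

def pvF (r : String) (d : List (String × List String)) : List (String × List String) :=
  pvMod d "parents" (fun l => l.erase r)

def pvG (e : String) (d : List (String × List String)) : List (String × List String) :=
  pvMod d "children" (fun l => l.erase e)

def gStep (elem rp : String) (h : List (String × List (String × List String))) :
    List (String × List (String × List String)) :=
  pvMod (pvMod h elem (pvF rp)) rp (pvG elem)

theorem pvRemoveStep_eq (elem : String) (h : List (String × List (String × List String))) (rp : String) :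
    pvRemoveStep elem h rp = gStep elem rp h := by
  simp only [pvRemoveStep, gStep]
  have e1 : (if rp ∈ pvParentsOf h elem then
      pvMod h elem (fun d => pvMod d "parents" (fun l => l.erase rp)) else h)
      = pvMod h elem (pvF rp) := by
    unfold pvF
    split
    · rfl
    · rename_i hmem
      refine (pvMod_eq_self _ _ _ ?_).symm
      intro d hd
      refine pvMod_eq_self _ _ _ ?_
      intro v hv
      apply List.erase_of_not_mem
      intro hrp
      apply hmem
      unfold pvParentsOf
      rw [hd]
      simpa [hv] using hrp
  rw [e1]
  split
  · rfl
  · rename_i hmem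
    refine (pvMod_eq_self _ _ _ ?_).symm
    intro d hd
    refine pvMod_eq_self _ _ _ ?_
    intro v hv
    apply List.erase_of_not_mem
    intro he
    apply hmem
    unfold pvChildrenOf
    rw [hd]
    simpa [hv] using he

theorem gStep_comm (elem x y : String) (h : List (String × List (String × List String))) :
    gStep elem y (gStep elem x h) = gStep elem x (gStep elem y h) := by
  by_cases hxy : x = y
  · subst hxy; rfl
  · have swap : ∀ (k r : String) (A : List (String × List (String × List String))),
        pvMod (pvMod A k (pvG elem)) elem (pvF r) = pvMod (pvMod A elem (pvF r)) k (pvG elem) := by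
      intro k r A
      by_cases hk : k = elem
      · subst hk
        rw [pvMod_pvMod_self, pvMod_pvMod_self]
        apply pvMod_congr
        intro d
        exact pvMod_comm d "children" "parents" _ _ (by decide)
      · exact pvMod_comm A k elem _ _ hk
    have merge : pvMod (pvMod h elem (pvF x)) elem (pvF y)
        = pvMod (pvMod h elem (pvF y)) elem (pvF x) := by
      rw [pvMod_pvMod_self, pvMod_pvMod_self]
      apply pvMod_congr
      intro d
      unfold pvF
      rw [pvMod_pvMod_self, pvMod_pvMod_self]
      apply pvMod_congr
      intro l
      exact List.erase_comm x y
    show pvMod (pvMod (pvMod (pvMod h elem (pvF x)) x (pvG elem)) elem (pvF y)) y (pvG elem)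
        = pvMod (pvMod (pvMod (pvMod h elem (pvF y)) y (pvG elem)) elem (pvF x)) x (pvG elem)
    rw [swap x y, merge, pvMod_comm _ x y _ _ hxy, ← swap y x]

theorem foldl_perm {α β : Type} (f : β → α → β)
    (hc : ∀ z x y, f (f z x) y = f (f z y) x) {l1 l2 : List α} (p : l1.Perm l2) (z : β) :
    l1.foldl f z = l2.foldl f z := by
  induction p generalizing z with
  | nil => rfl
  | cons a _ ih => simp only [List.foldl_cons]; exact ih _
  | swap a b l => simp only [List.foldl_cons]; rw [hc]
  | trans _ _ ih1 ih2 => exact (ih1 z).trans (ih2 z)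

-- ---- subset-test facts ----
theorem psub_irrefl (s : PySem.Set String) : pvPsub s s = false := by
  unfold pvPsub
  cases h : PySem.Set.issubset s s <;> simp [h]

theorem nodup_length_le (s t : List String) (hs : s.Nodup) (h : s ⊆ t) : s.length ≤ t.length := by
  exact (List.subperm_of_subset hs h).length_le

theorem psub_length_lt (s t : List String) (hs : s.Nodup) (ht : t.Nodup)
    (h : pvPsub s t = true) : s.length < t.length := by
  unfold pvPsub at h
  rw [Bool.and_eq_true] at h
  obtain ⟨h1, h2⟩ := h
  have hsub : ∀ x ∈ s, x ∈ t := (PySem.Set.issubset_iff s t).mp h1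
  have hns : ¬ ∀ x ∈ t, x ∈ s := by
    intro hh
    rw [← PySem.Set.issubset_iff] at hh
    simp [hh] at h2
  push_neg at hns
  obtain ⟨y, hy, hys⟩ := hns
  have hsub2 : s ⊆ t.erase y := by
    intro x hx
    have hxy : x ≠ y := by rintro rfl; exact hys hx
    exact (List.mem_erase_of_ne hxy).mpr (hsub x hx)
  have hle := (List.subperm_of_subset hs hsub2).length_le
  rw [List.length_erase_of_mem hy] at hle
  have hpos : 0 < t.length := List.length_pos_of_mem hy
  omega

theorem psub_sub (s t u : List String) (hs : s.Nodup) (ht : t.Nodup) (hu : u.Nodup)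
    (h1 : pvPsub s t = true) (h2 : PySem.Set.issubset t u = true) : pvPsub s u = true := by
  have h1 := h1
  unfold pvPsub at h1 ⊢
  rw [Bool.and_eq_true] at h1
  obtain ⟨hst, hts⟩ := h1
  have hstm : ∀ x ∈ s, x ∈ t := (PySem.Set.issubset_iff s t).mp hst
  have htum : ∀ x ∈ t, x ∈ u := (PySem.Set.issubset_iff t u).mp h2
  rw [Bool.and_eq_true]
  constructor
  · rw [PySem.Set.issubset_iff]
    exact fun x hx => htum x (hstm x hx)
  · have hlt : s.length < t.length := psub_length_lt s t hs ht (by unfold pvPsub; rw [Bool.and_eq_true]; exact ⟨hst, hts⟩)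
    have htu : t.length ≤ u.length := nodup_length_le t u ht htum
    cases hus : PySem.Set.issubset u s with
    | false => simp
    | true =>
      have := nodup_length_le u s hu ((PySem.Set.issubset_iff u s).mp hus)
      omega

theorem nodup_add (s : PySem.Set String) (x : String) (hs : s.Nodup) : (PySem.Set.add s x).Nodup := by
  exact PySem.Set.nodup_add s x hs

theorem psub_issubset (s t : PySem.Set String) (h : pvPsub s t = true) :
    PySem.Set.issubset s t = true := by
  unfold pvPsub at h
  rw [Bool.and_eq_true] at h
  exact h.1

theorem issubset_refl (s : PySem.Set String) : PySem.Set.issubset s s = true := by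
  rw [PySem.Set.issubset_iff]
  exact fun x hx => hx

theorem memA_inner (att : String → PySem.Set String) (parents : List String) (p1 : String)
    (tr : PySem.Set String) (x : String) :
    (x ∈ parents.foldl (fun tr p2 =>
      if p1 = p2 then tr
      else if pvPsub (att p2) (att p1) then PySem.Set.add tr p2 else tr) tr) ↔
    x ∈ tr ∨ (x ∈ parents ∧ p1 ≠ x ∧ pvPsub (att x) (att p1) = true) := by
  induction parents generalizing tr with
  | nil => simp
  | cons p2 t ih =>
    simp only [List.foldl_cons]
    rw [ih]
    have hstep : (x ∈ (if p1 = p2 then tr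
          else if pvPsub (att p2) (att p1) then PySem.Set.add tr p2 else tr))
        ↔ x ∈ tr ∨ (x = p2 ∧ p1 ≠ x ∧ pvPsub (att x) (att p1) = true) := by
      split
      · rename_i hpp
        constructor
        · exact Or.inl
        · rintro (hh | ⟨rfl, hne, _⟩)
          · exact hh
          · exact absurd hpp hne
      · rename_i hpp
        split
        · rename_i hps
          rw [PySem.Set.mem_add]
          constructor
          · rintro (hh | rfl)
            · exact Or.inl hh
            · exact Or.inr ⟨rfl, hpp, hps⟩
          · rintro (hh | ⟨rfl, _, _⟩)
            · exact Or.inl hh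
            · exact Or.inr rfl
        · rename_i hps
          constructor
          · exact Or.inl
          · rintro (hh | ⟨rfl, _, hps2⟩)
            · exact hh
            · exact absurd hps2 hps
    rw [hstep]
    simp only [List.mem_cons]
    tauto

theorem memA (att : String → PySem.Set String) (parents : List String) (x : String) :
    (x ∈ parents.foldl (fun tr p1 =>
      parents.foldl (fun tr p2 =>
        if p1 = p2 then tr
        else if pvPsub (att p2) (att p1) then PySem.Set.add tr p2 else tr) tr)
      (PySem.Set.empty : PySem.Set String)) ↔
    x ∈ parents ∧ ∃ q ∈ parents, pvPsub (att x) (att q) = true := by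
  have outer : ∀ (l : List String) (tr : PySem.Set String),
      (x ∈ l.foldl (fun tr p1 =>
        parents.foldl (fun tr p2 =>
          if p1 = p2 then tr
          else if pvPsub (att p2) (att p1) then PySem.Set.add tr p2 else tr) tr) tr)
      ↔ x ∈ tr ∨ ∃ p1 ∈ l, x ∈ parents ∧ p1 ≠ x ∧ pvPsub (att x) (att p1) = true := by
    intro l
    induction l with
    | nil => simp
    | cons p1 t ih =>
      intro tr
      simp only [List.foldl_cons]
      rw [ih, memA_inner]
      simp only [List.mem_cons]
      constructor
      · rintro ((hh | hh) | ⟨q, hq, hrest⟩)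
        · exact Or.inl hh
        · exact Or.inr ⟨p1, Or.inl rfl, hh⟩
        · exact Or.inr ⟨q, Or.inr hq, hrest⟩
      · rintro (hh | ⟨q, hq | hq, hrest⟩)
        · exact Or.inl (Or.inl hh)
        · exact Or.inl (Or.inr (hq ▸ hrest))
        · exact Or.inr ⟨q, hq, hrest⟩
  rw [outer parents PySem.Set.empty]
  constructor
  · rintro (hh | ⟨q, hq, hxp, _, hps⟩)
    · cases hh
    · exact ⟨hxp, q, hq, hps⟩
  · rintro ⟨hxp, q, hq, hps⟩
    refine Or.inr ⟨q, hq, hxp, ?_, hps⟩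
    intro he
    subst he
    rw [psub_irrefl] at hps
    cases hps

theorem nodupA (att : String → PySem.Set String) (parents : List String) :
    (parents.foldl (fun tr p1 =>
      parents.foldl (fun tr p2 =>
        if p1 = p2 then tr
        else if pvPsub (att p2) (att p1) then PySem.Set.add tr p2 else tr) tr)
      (PySem.Set.empty : PySem.Set String)).Nodup := by
  have inner : ∀ (p1 : String) (tr : PySem.Set String), tr.Nodup →
      (parents.foldl (fun tr p2 =>
        if p1 = p2 then tr
        else if pvPsub (att p2) (att p1) then PySem.Set.add tr p2 else tr) tr).Nodup := by
    intro p1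
    induction parents with
    | nil => intro tr h; exact h
    | cons p2 t ih =>
      intro tr h
      simp only [List.foldl_cons]
      apply ih
      split
      · exact h
      · split
        · exact PySem.Set.nodup_add tr p2 h
        · exact h
  have outer : ∀ (l : List String) (tr : PySem.Set String), tr.Nodup →
      (l.foldl (fun tr p1 =>
        parents.foldl (fun tr p2 =>
          if p1 = p2 then tr
          else if pvPsub (att p2) (att p1) then PySem.Set.add tr p2 else tr) tr) tr).Nodup := by
    intro l
    induction l with
    | nil => intro tr h; exact h
    | cons p1 t ih =>
      intro tr h
      simp only [List.foldl_cons]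
      exact ih _ (inner p1 tr h)
  exact outer parents PySem.Set.empty List.nodup_nil

-- ---- B's pass characterisation ----
def passF (a : String → PySem.Set String) (acc : List (PySem.Set String) × List String) (p : String) :
    List (PySem.Set String) × List String :=
  if acc.1.any (fun r => pvPsub (a p) r) then (acc.1, acc.2 ++ [p]) else (acc.1 ++ [a p], acc.2)

theorem pass_mono (a : String → PySem.Set String) (o : List String)
    (acc : List (PySem.Set String) × List String) : acc.2 ⊆ (o.foldl (passF a) acc).2 := by
  induction o generalizing acc with
  | nil => exact fun x hx => hx
  | cons p t ih =>
    intro x hx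
    simp only [List.foldl_cons]
    apply ih (passF a acc p)
    unfold passF
    split
    · exact List.mem_append_left _ hx
    · exact hx

theorem pass_subset (a : String → PySem.Set String) (o : List String)
    (acc : List (PySem.Set String) × List String) :
    ∀ x ∈ (o.foldl (passF a) acc).2, x ∈ acc.2 ∨ x ∈ o := by
  induction o generalizing acc with
  | nil => intro x hx; exact Or.inl hx
  | cons p t ih =>
    intro x hx
    simp only [List.foldl_cons] at hx
    rcases ih (passF a acc p) x hx with hh | hh
    · unfold passF at hh
      split at hh
      · rcases List.mem_append.mp hh with h2 | h2
        · exact Or.inl h2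
        · simp only [List.mem_singleton] at h2
          exact Or.inr (h2 ▸ List.mem_cons_self)
      · exact Or.inl hh
    · exact Or.inr (List.mem_cons_of_mem p hh)

theorem pass_sound (a : String → PySem.Set String) (G : String → Prop) (o : List String)
    (acc : List (PySem.Set String) × List String)
    (Hr : ∀ s ∈ acc.1, ∃ q, G q ∧ s = a q) (HG : ∀ p ∈ o, G p) :
    ∀ x ∈ (o.foldl (passF a) acc).2, x ∈ acc.2 ∨ ∃ q, G q ∧ pvPsub (a x) (a q) = true := by
  induction o generalizing acc with
  | nil => intro x hx; exact Or.inl hx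
  | cons p t ih =>
    intro x hx
    simp only [List.foldl_cons] at hx
    have Hr' : ∀ s ∈ (passF a acc p).1, ∃ q, G q ∧ s = a q := by
      intro s hs
      unfold passF at hs
      split at hs
      · exact Hr s hs
      · rcases List.mem_append.mp hs with h2 | h2
        · exact Hr s h2
        · simp only [List.mem_singleton] at h2
          exact ⟨p, HG p List.mem_cons_self, h2⟩
    rcases ih (passF a acc p) Hr' (fun q hq => HG q (List.mem_cons_of_mem p hq)) x hx with hh | hh
    · unfold passF at hh
      split at hh
      · rename_i hany
        rcases List.mem_append.mp hh with h2 | h2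
        · exact Or.inl h2
        · simp only [List.mem_singleton] at h2
          subst h2
          rcases List.any_eq_true.mp hany with ⟨r, hr, hps⟩
          rcases Hr r hr with ⟨q, hGq, rfl⟩
          exact Or.inr ⟨q, hGq, hps⟩
      · exact Or.inl hh
    · exact Or.inr hh

theorem pass_complete (a : String → PySem.Set String) (hnda : ∀ p, (a p).Nodup)
    (o : List String) (acc : List (PySem.Set String) × List String)
    (hdesc : o.Pairwise (fun p q => (a q).length ≤ (a p).length))
    (hr1 : ∀ s ∈ acc.1, s.Nodup)
    (Q : String → Prop) (HQ : ∀ q, Q q → ∃ s ∈ acc.1, PySem.Set.issubset (a q) s = true)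
    (x q : String) (hx : x ∈ o) (hq : Q q ∨ q ∈ o) (hps : pvPsub (a x) (a q) = true) :
    x ∈ (o.foldl (passF a) acc).2 := by
  induction o generalizing acc Q with
  | nil => cases hx
  | cons p t ih =>
    simp only [List.foldl_cons]
    rw [List.pairwise_cons] at hdesc
    obtain ⟨hhead, htail⟩ := hdesc
    by_cases hbr : acc.1.any (fun r => pvPsub (a p) r) = true
    · -- p is removed
      have hacc' : passF a acc p = (acc.1, acc.2 ++ [p]) := by unfold passF; rw [if_pos hbr]
      rcases List.mem_cons.mp hx with hxp | hxt
      · apply pass_mono a t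
        rw [hacc']
        exact List.mem_append_right _ (by simp [hxp])
      · refine ih _ htail ?_ (fun r => Q r ∨ r = p) ?_ hxt ?_
        · rw [hacc']; exact hr1
        · rintro q' (hq' | rfl)
          · rcases HQ q' hq' with ⟨s, hs, hsub⟩
            exact ⟨s, by rw [hacc']; exact hs, hsub⟩
          · rcases List.any_eq_true.mp hbr with ⟨r, hr, hps⟩
            exact ⟨r, by rw [hacc']; exact hr, psub_issubset _ _ (hps)⟩
        · rcases hq with hq | hq
          · exact Or.inl (Or.inl hq)
          · rcases List.mem_cons.mp hq with rfl | hq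
            · exact Or.inl (Or.inr rfl)
            · exact Or.inr hq
    · -- p is retained
      have hacc' : passF a acc p = (acc.1 ++ [a p], acc.2) := by unfold passF; rw [if_neg hbr]
      rcases List.mem_cons.mp hx with hxp | hxt
      · -- impossible: some q forces removal of p
        exfalso
        rw [hxp] at hps
        apply hbr
        rcases hq with hq | hq
        · rcases HQ q hq with ⟨s, hs, hsub⟩
          have := psub_sub (a p) (a q) s (hnda p) (hnda q) (hr1 s hs) hps hsub
          exact List.any_eq_true.mpr ⟨s, hs, this⟩
        · rcases List.mem_cons.mp hq with rfl | hq
          · rw [psub_irrefl] at hps; cases hps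
          · have hlen := psub_length_lt (a p) (a q) (hnda p) (hnda q) hps
            have := hhead q hq
            omega
      · refine ih _ htail ?_ (fun r => Q r ∨ r = p) ?_ hxt ?_
        · rw [hacc']
          intro s hs
          rcases List.mem_append.mp hs with h2 | h2
          · exact hr1 s h2
          · simp only [List.mem_singleton] at h2
            exact h2 ▸ hnda p
        · rintro q' (hq' | hq'p)
          · rcases HQ q' hq' with ⟨s, hs, hsub⟩
            exact ⟨s, by rw [hacc']; exact List.mem_append_left _ hs, hsub⟩
          · exact ⟨a p, by rw [hacc']; exact List.mem_append_right _ List.mem_cons_self,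
              by rw [hq'p]; exact issubset_refl _⟩
        · rcases hq with hq | hq
          · exact Or.inl (Or.inl hq)
          · rcases List.mem_cons.mp hq with rfl | hq
            · exact Or.inl (Or.inr rfl)
            · exact Or.inr hq

theorem pass_nodup (a : String → PySem.Set String) (o : List String)
    (acc : List (PySem.Set String) × List String) (hnd : o.Nodup) (hacc : acc.2.Nodup)
    (hdisj : ∀ x ∈ o, x ∉ acc.2) : (o.foldl (passF a) acc).2.Nodup := by
  induction o generalizing acc with
  | nil => exact hacc
  | cons p t ih =>
    simp only [List.foldl_cons]
    rw [List.nodup_cons] at hnd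
    apply ih (passF a acc p) hnd.2
    · unfold passF
      split
      · refine List.Nodup.append hacc (List.nodup_singleton p) ?_
        intro x hx hp
        simp only [List.mem_singleton] at hp
        exact hdisj p List.mem_cons_self (hp ▸ hx)
      · exact hacc
    · intro x hx
      unfold passF
      split
      · intro hmem
        rcases List.mem_append.mp hmem with h2 | h2
        · exact hdisj x (List.mem_cons_of_mem p hx) h2
        · simp only [List.mem_singleton] at h2
          exact hnd.1 (h2 ▸ hx)
      · exact hdisj x (List.mem_cons_of_mem p hx)

-- ---- dict plumbing for B ----
theorem getD_fold_insert (g : String → PySem.Set String) (l : List String)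
    (d : PySem.Dict String (PySem.Set String)) (q : String) (dflt : PySem.Set String) :
    (l.foldl (fun d p => d.insert p (g p)) d).getD q dflt =
      if q ∈ l then g q else d.getD q dflt := by
  induction l generalizing d with
  | nil => simp
  | cons p t ih =>
    simp only [List.foldl_cons]
    rw [ih]
    by_cases hq : q ∈ t
    · simp [hq]
    · rw [PySem.Dict.getD_insert]
      by_cases hqp : q = p
      · subst hqp
        simp [hq]
      · simp [hq, hqp, List.mem_cons]

-- ---- the per-element steps agree, hence the programs do ----
theorem step_eq (element_attrs : List (String × List (String × List String)))
    (h : List (String × List (String × List String))) (elem : String) :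
    pvAStep element_attrs h elem = pvBStep element_attrs h elem := by
  have key : ∀ (P : List String),
      (P.foldl (fun tr p1 => P.foldl (fun tr p2 => if p1 = p2 then tr
          else if pvPsub (pvAttrs element_attrs p2) (pvAttrs element_attrs p1) then
            PySem.Set.add tr p2 else tr) tr)
        (PySem.Set.empty : PySem.Set String)).foldl (pvRemoveStep elem) h
      = (((PySem.List.sorted
            (P.foldl (fun d p => d.insert p (pvAttrs element_attrs p)) PySem.Dict.empty).keys
            (fun p => (((P.foldl (fun d p => d.insert p (pvAttrs element_attrs p))
              PySem.Dict.empty).getD p []).length : Int)) true).foldl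
          (passF (fun p => (P.foldl (fun d p => d.insert p (pvAttrs element_attrs p))
            PySem.Dict.empty).getD p [])) ([], [])).2).foldl (pvRemoveStep elem) h := by
    intro P
    set attrs := P.foldl (fun d p => d.insert p (pvAttrs element_attrs p)) PySem.Dict.empty
      with hattrs
    set o := PySem.List.sorted attrs.keys (fun p => ((attrs.getD p []).length : Int)) true with ho
    set a : String → PySem.Set String := fun p => attrs.getD p [] with ha
    have haP : ∀ p, a p = if p ∈ P then pvAttrs element_attrs p else [] := by
      intro p
      show attrs.getD p [] = _
      rw [hattrs, getD_fold_insert (fun p => pvAttrs element_attrs p) P PySem.Dict.empty p []]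
      split
      · rfl
      · exact PySem.Dict.getD_empty p []
    have hupd : PySem.Set.update ([] : PySem.Set String) P = PySem.Set.ofList P := rfl
    have hkeys : ∀ x, x ∈ attrs.keys ↔ x ∈ P := by
      intro x
      rw [hattrs, PySem.Dict.keys_foldl_insert P (fun _ p => pvAttrs element_attrs p)
        PySem.Dict.empty, PySem.Dict.keys_empty, hupd]
      exact PySem.Set.mem_ofList P x
    have hknodup : attrs.keys.Nodup := by
      rw [hattrs]
      exact PySem.Dict.nodup_keys_foldl_insert P (fun _ p => pvAttrs element_attrs p)
        PySem.Dict.empty (by rw [PySem.Dict.keys_empty]; exact List.nodup_nil)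
    have hond : o.Nodup := ((PySem.List.sorted_perm _ _ _).nodup_iff).mpr hknodup
    have homem : ∀ x, x ∈ o ↔ x ∈ P := fun x =>
      (PySem.List.mem_sorted _ _ _ x).trans (hkeys x)
    have hnda : ∀ p, (a p).Nodup := by
      intro p
      rw [haP]
      split
      · exact PySem.Set.nodup_ofList _
      · exact List.nodup_nil
    have hdesc : o.Pairwise (fun p q => (a q).length ≤ (a p).length) := by
      have hpw := PySem.List.sorted_pairwise_rev attrs.keys
        (fun p => ((attrs.getD p []).length : Int))
      rw [← ho] at hpw
      refine hpw.imp ?_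
      intro p q hh
      exact_mod_cast hh
    have memB : ∀ x, x ∈ ((o.foldl (passF a) ([], [])).2) ↔
        (x ∈ P ∧ ∃ q ∈ P, pvPsub (pvAttrs element_attrs x) (pvAttrs element_attrs q) = true) := by
      intro x
      constructor
      · intro hx
        have hxP : x ∈ P := by
          rcases pass_subset a o ([], []) x hx with h2 | h2
          · cases h2
          · exact (homem x).mp h2
        rcases pass_sound a (· ∈ P) o ([], []) (by intro s hs; cases hs)
            (fun p hp => (homem p).mp hp) x hx with h2 | h2
        · cases h2
        · rcases h2 with ⟨q, hqP, hps⟩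
          refine ⟨hxP, q, hqP, ?_⟩
          rw [haP, haP] at hps
          simpa [hxP, hqP] using hps
      · rintro ⟨hxP, q, hqP, hps⟩
        refine pass_complete a hnda o ([], []) hdesc (by intro s hs; cases hs)
          (fun _ => False) (by intro r hr; cases hr) x q ((homem x).mpr hxP)
          (Or.inr ((homem q).mpr hqP)) ?_
        rw [haP, haP]
        simpa [hxP, hqP] using hps
    have ndB : ((o.foldl (passF a) ([], [])).2).Nodup :=
      pass_nodup a o ([], []) hond List.nodup_nil (by intro x _ hx; cases hx)
    have hperm : (P.foldl (fun tr p1 => P.foldl (fun tr p2 => if p1 = p2 then tr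
          else if pvPsub (pvAttrs element_attrs p2) (pvAttrs element_attrs p1) then
            PySem.Set.add tr p2 else tr) tr)
        (PySem.Set.empty : PySem.Set String)).Perm ((o.foldl (passF a) ([], [])).2) := by
      refine (List.perm_ext_iff_of_nodup (nodupA (pvAttrs element_attrs) P) ndB).mpr ?_
      intro x
      exact (memA (pvAttrs element_attrs) P x).trans (memB x).symm
    have hcomm : ∀ (z : List (String × List (String × List String))) (x y : String),
        pvRemoveStep elem (pvRemoveStep elem z x) y
          = pvRemoveStep elem (pvRemoveStep elem z y) x := by
      intro z x y
      simp only [pvRemoveStep_eq]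
      exact gStep_comm elem x y z
    exact foldl_perm (pvRemoveStep elem) hcomm hperm h
  exact key (pvParentsOf h elem)

theorem main_eq (hierarchy element_attrs : List (String × List (String × List String))) :
    transitive_reduction_py hierarchy element_attrs = transitive_reduction_py_alt hierarchy element_attrs := by
  unfold transitive_reduction_py transitive_reduction_py_alt
  have hfold : ∀ (es : List String) (h : List (String × List (String × List String))),
      es.foldl (pvAStep element_attrs) h = es.foldl (pvBStep element_attrs) h := by
    intro es
    induction es with
    | nil => intro h; rfl
    | cons e t ih =>
      intro h
      simp only [List.foldl_cons]
      rw [step_eq]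
      exact ih _
  exact hfold _ _

-- ===== VERDICT (by name: the statement is the Claim_ definition above) =====
theorem transitive_reduction_py_spec : Claim_equal_transitive_reduction_py := by
  intro hierarchy element_attrs _ _
  exact main_eq hierarchy element_attrs
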